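-- pv_equiv track=rewrite | github.com/RealistikDash/GDPyS | helpers/filterhelper.py | check_comment
-- ===== SOURCE A (Python) =====
-- COMMENT_CHAR_LIMIT = 100
--
-- COMMENT_ALLOWED_CHARS = list(
--     "abcdefghijklmnopqrstuvwxyzABCDEFGHIJKLMNOPQRSTUVWXYZ0123456789_-/ "
-- )
--
-- def check_comment(comment: str) -> bool:
--     """Checks if a given comment can be legitemately made inside GD."""
--     comment = list(comment)  # easier to analyse
--
--     if len(comment) > COMMENT_CHAR_LIMIT:
--         return False
--
--     for char in comment:
--         if char not in COMMENT_ALLOWED_CHARS: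
--             return False
--
--     return True
-- ===== SOURCE B (Python) =====
-- import re
--
-- _COMMENT_RE = re.compile(r'[a-zA-Z0-9_/ -]{0,100}')
--
-- def check_comment(comment: str) -> bool:
--     """Checks if a given comment can be legitemately made inside GD."""
--     return bool(_COMMENT_RE.fullmatch(comment))
-- ===== Notes on version B (the rewrite author's own statement) =====
-- stated objective: idiomatic
-- what changed: Replaced the explicit length check and per-character membership loop over a 65-element list with a single precompiled regex fullmatch whose character class and {0,100} quantifier enforce both rules in one engine scan.
import Mathlib
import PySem

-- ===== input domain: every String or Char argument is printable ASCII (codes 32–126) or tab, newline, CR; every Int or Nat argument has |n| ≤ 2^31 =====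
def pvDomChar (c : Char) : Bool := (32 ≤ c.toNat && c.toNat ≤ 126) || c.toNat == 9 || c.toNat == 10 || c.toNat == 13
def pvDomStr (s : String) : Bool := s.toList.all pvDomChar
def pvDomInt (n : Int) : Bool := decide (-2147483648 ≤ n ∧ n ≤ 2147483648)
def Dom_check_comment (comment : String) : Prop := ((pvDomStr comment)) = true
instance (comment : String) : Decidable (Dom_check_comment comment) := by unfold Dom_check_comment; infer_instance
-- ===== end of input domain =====

-- B replaces A's length check + per-character scan over a 65-element allowed list by a single
-- regex fullmatch r'[a-zA-Z0-9_/ -]{0,100}' (idiomatic); ported as the regex's semantics: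
-- length ≤ 100 and every char in the character class.

-- ===== PORT A =====
def COMMENT_CHAR_LIMIT : Int := 100

def COMMENT_ALLOWED_CHARS : List Char :=
  "abcdefghijklmnopqrstuvwxyzABCDEFGHIJKLMNOPQRSTUVWXYZ0123456789_-/ ".toList

-- the `for char in comment: if char not in ...: return False` loop
def checkCommentLoop : List Char → Bool
  | [] => true
  | c :: rest => if ¬ (COMMENT_ALLOWED_CHARS.contains c) then false else checkCommentLoop rest

def check_comment (comment : String) : Bool :=
  let cs := comment.toList
  if (cs.length : Int) > COMMENT_CHAR_LIMIT then false
  else checkCommentLoop cs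

-- ===== PORT B =====
-- the character class [a-zA-Z0-9_/ -]
def commentClass (c : Char) : Bool :=
  ('a' ≤ c && c ≤ 'z') || ('A' ≤ c && c ≤ 'Z') || ('0' ≤ c && c ≤ '9')
    || c == '_' || c == '/' || c == ' ' || c == '-'

-- re.fullmatch of the class repeated {0,100}: whole string matches iff length ≤ 100 and all chars in class
def check_comment_alt (comment : String) : Bool :=
  decide (comment.toList.length ≤ 100) && comment.toList.all commentClass

-- ===== PRECONDITION & SPEC =====
def Spec_check_comment (comment : String) (out : Bool) : Prop := out = check_comment_alt comment
instance (comment : String) (out : Bool) : Decidable (Spec_check_comment comment out) := by unfold Spec_check_comment; infer_instance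

-- ===== CLAIM (what is proved, stated in full; the proofs are below) =====
def Claim_equal_check_comment : Prop := ∀ (comment : String), Dom_check_comment comment → Spec_check_comment comment (check_comment comment)

-- ===== LEMMAS AND PROOFS =====
set_option maxRecDepth 4000 in
theorem mem_allowed_of_nat : ∀ n < 128,
    (COMMENT_ALLOWED_CHARS.contains (Char.ofNat n)) = commentClass (Char.ofNat n) := by decide

theorem mem_allowed (c : Char) (h : c.toNat < 128) :
    (COMMENT_ALLOWED_CHARS.contains c) = commentClass c := by
  have := mem_allowed_of_nat c.toNat h
  rwa [Char.ofNat_toNat] at this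

theorem loop_eq_all (cs : List Char) (h : ∀ c ∈ cs, c.toNat < 128) :
    checkCommentLoop cs = cs.all commentClass := by
  induction cs with
  | nil => rfl
  | cons c rest ih =>
    have hc := mem_allowed c (h c (List.mem_cons_self ..))
    have ih' := ih (fun x hx => h x (List.mem_cons_of_mem _ hx))
    cases hcl : commentClass c <;>
      simp only [checkCommentLoop, List.all_cons, hc, hcl, ih'] <;> simp

theorem dom_chars {comment : String} (h : Dom_check_comment comment) :
    ∀ c ∈ comment.toList, c.toNat < 128 := by
  intro c hc
  have := List.all_eq_true.mp h c hc
  simp only [pvDomChar, Bool.or_eq_true, Bool.and_eq_true, decide_eq_true_eq, beq_iff_eq] at this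
  omega

-- ===== VERDICT (by name: the statement is the Claim_ definition above) =====
theorem check_comment_spec : Claim_equal_check_comment := by
  intro comment hdom
  unfold Spec_check_comment check_comment check_comment_alt COMMENT_CHAR_LIMIT
  have hloop := loop_eq_all comment.toList (dom_chars hdom)
  by_cases hlen : comment.toList.length ≤ 100
  · have h1 : ¬ ((comment.toList.length : Int) > 100) := by omega
    simp only [h1, if_false, hloop, hlen, decide_true, Bool.true_and]
  · have h1 : (comment.toList.length : Int) > 100 := by omega
    simp only [h1, if_true, hlen, decide_false, Bool.false_and]
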